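-- pv_equiv track=rewrite | github.com/YoannDupont/SEM | src/posttreatment/export.py | add_chunking
-- ===== SOURCE A (Python) =====
-- def add_chunking(escaped, corpus, column):
--     to_return = [e[:] for e in escaped]
--     for i in range(len(to_return)):
--         for j in range(len(to_return[i])):
--             if corpus[i][j][column][0] == "O": continue
--             chunk_name = corpus[i][j][column][2:]
--             if corpus[i][j][column][0] == "B":
--                 to_return[i][j] = '<span id="%s" title="%s">%s' %(chunk_name, chunk_name, escaped[i][j])
--             if corpus[i][j][column][0] in "BI" and (j+1 == len(to_return[i]) or corpus[i][j+1][column][0] != "I"):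
--                 to_return[i][j] += '</span>'
--     return to_return
-- ===== SOURCE B (Python) =====
-- def add_chunking(escaped, corpus, column):
--     result = []
--     for i, row in enumerate(escaped):
--         out_row = []
--         prev_word = prev_tag = None
--         for j, word in enumerate(row):
--             tag = corpus[i][j][column]
--             if tag[0] == "B":
--                 word = '<span id="%s" title="%s">%s' % (tag[2:], tag[2:], word)
--             if prev_tag is not None:
--                 if prev_tag[0] in "BI" and tag[0] != "I":
--                     prev_word += '</span>'
--                 out_row.append(prev_word)
--             prev_word, prev_tag = word, tag
--         if prev_tag is not None:
--             if prev_tag[0] in "BI":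
--                 prev_word += '</span>'
--             out_row.append(prev_word)
--         result.append(out_row)
--     return result
-- ===== Notes on version B (the rewrite author's own statement) =====
-- stated objective: alternative
-- what changed: A walks each row by index, mutating a copy in place and deciding the closing </span> with a j+1 look-ahead; B streams each row once with a one-token delay buffer, opening the current token and closing the buffered previous token by look-behind, emitting tokens as it goes.
import Mathlib
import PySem

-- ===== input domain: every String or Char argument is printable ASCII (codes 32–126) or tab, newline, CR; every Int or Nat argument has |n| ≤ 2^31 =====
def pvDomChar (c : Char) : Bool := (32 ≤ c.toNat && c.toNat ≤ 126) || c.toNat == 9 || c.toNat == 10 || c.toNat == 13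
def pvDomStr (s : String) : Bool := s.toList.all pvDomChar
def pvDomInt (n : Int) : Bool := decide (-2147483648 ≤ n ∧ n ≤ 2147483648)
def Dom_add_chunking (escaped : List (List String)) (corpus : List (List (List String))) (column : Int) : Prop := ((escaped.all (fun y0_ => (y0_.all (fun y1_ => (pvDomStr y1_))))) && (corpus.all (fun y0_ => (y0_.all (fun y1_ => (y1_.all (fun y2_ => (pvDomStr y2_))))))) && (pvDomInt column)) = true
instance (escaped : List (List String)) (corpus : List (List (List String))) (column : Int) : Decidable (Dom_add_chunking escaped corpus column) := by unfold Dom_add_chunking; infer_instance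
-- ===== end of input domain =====

-- B replaces A's index loop (j+1 look-ahead, in-place mutation of a copy) with a one-pass
-- streaming loop that buffers the previous token and closes it on look-behind; objective:
-- alternative decomposition, same asymptotic cost.

-- ===== PORT A =====
-- corpus[i][j][column] (total form: Pre_ guarantees every access is in range and non-empty)
def pvCell (corpus : List (List (List String))) (column : Int) (i j : Nat) : String :=
  (PySem.List.pyGet? ((corpus.getD i []).getD j []) column).getD ""

-- s[0] (total form; Pre_ guarantees the string is non-empty)
def pvHead (s : String) : Char := (PySem.Str.pyGet? s 0).getD ' '

-- '<span id="%s" title="%s">%s' % (name, name, w)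
def pvSpan (name w : String) : String :=
  "<span id=\"" ++ name ++ "\" title=\"" ++ name ++ "\">" ++ w

-- the body of A's inner loop over j (to_return[i][j] mutation = set at i, set at j)
def pvInnerA (escaped : List (List String)) (corpus : List (List (List String))) (column : Int)
    (i : Nat) (tr : List (List String)) (j : Nat) : List (List String) :=
  -- if corpus[i][j][column][0] == "O": continue
  if pvHead (pvCell corpus column i j) = 'O' then tr
  else
    -- chunk_name = corpus[i][j][column][2:]
    let chunk_name := PySem.Str.slice (pvCell corpus column i j) (some 2) none
    let tr := if pvHead (pvCell corpus column i j) = 'B' then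
        tr.set i ((tr.getD i []).set j (pvSpan chunk_name ((escaped.getD i []).getD j "")))
      else tr
    -- corpus[i][j][column][0] in "BI" (substring test on the 1-char string tag[0])
    if PySem.Chars.isIn [pvHead (pvCell corpus column i j)] "BI".toList &&
       (j + 1 == (tr.getD i []).length || pvHead (pvCell corpus column i (j+1)) != 'I') then
      tr.set i ((tr.getD i []).set j (((tr.getD i []).getD j "") ++ "</span>"))
    else tr

def add_chunking (escaped : List (List String)) (corpus : List (List (List String))) (column : Int) : List (List String) :=
  -- to_return = [e[:] for e in escaped]
  let to_return := escaped.map (fun e => PySem.List.slice e none none)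
  (List.range to_return.length).foldl (fun tr i =>
    (List.range ((tr.getD i []).length)).foldl (pvInnerA escaped corpus column i) tr) to_return

-- ===== PORT B =====
-- one step of B's inner loop: (out_row, prev_word/prev_tag) is the carried state, (word, j) the token
def pvStepB (corpus : List (List (List String))) (column : Int) (i : Nat)
    (st : List String × Option (String × String)) (wj : String × Nat) : List String × Option (String × String) :=
  let tag := pvCell corpus column i wj.2
  let word := if pvHead tag = 'B' then
      pvSpan (PySem.Str.slice tag (some 2) none) wj.1
    else wj.1
  match st.2 with
  | none => (st.1, some (word, tag))
  | some (pw, pt) =>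
    let pw := if PySem.Chars.isIn [pvHead pt] "BI".toList && pvHead tag != 'I' then pw ++ "</span>" else pw
    (st.1 ++ [pw], some (word, tag))

-- after the row loop: flush the buffered last token
def pvFlushB (st : List String × Option (String × String)) : List String :=
  match st.2 with
  | none => st.1
  | some (pw, pt) => st.1 ++ [if PySem.Chars.isIn [pvHead pt] "BI".toList then pw ++ "</span>" else pw]

def add_chunking_alt (escaped : List (List String)) (corpus : List (List (List String))) (column : Int) : List (List String) :=
  escaped.zipIdx.foldl (fun result rowi =>
    result ++ [pvFlushB (rowi.1.zipIdx.foldl (pvStepB corpus column rowi.2) ([], none))]) []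

-- ===== PRECONDITION & SPEC =====
-- Pre_ excludes exactly the inputs on which Python A raises an IndexError: some token of
-- escaped has no corresponding corpus cell, the column index is out of range for that cell,
-- or the selected tag string is empty.
def Pre_add_chunking (escaped : List (List String)) (corpus : List (List (List String))) (column : Int) : Prop :=
  ∀ i, i < escaped.length → ∀ j, j < (escaped.getD i []).length →
    i < corpus.length ∧ j < (corpus.getD i []).length ∧
    PySem.Raise.InRange ((corpus.getD i []).getD j []).length column ∧
    (PySem.List.pyGet? ((corpus.getD i []).getD j []) column).getD "" ≠ ""
instance (escaped : List (List String)) (corpus : List (List (List String))) (column : Int) : Decidable (Pre_add_chunking escaped corpus column) := by unfold Pre_add_chunking; infer_instance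

def pvWitness_add_chunking : List (List String) × List (List (List String)) × Int :=
  ([["a", "b", "c"]], [[["B-X"], ["I-X"], ["O"]]], 0)

def Spec_add_chunking (escaped : List (List String)) (corpus : List (List (List String))) (column : Int) (out : List (List String)) : Prop := out = add_chunking_alt escaped corpus column
instance (escaped : List (List String)) (corpus : List (List (List String))) (column : Int) (out : List (List String)) : Decidable (Spec_add_chunking escaped corpus column out) := by unfold Spec_add_chunking; infer_instance

-- ===== CLAIM (what is proved, stated in full; the proofs are below) =====
def Claim_equal_add_chunking : Prop := ∀ (escaped : List (List String)) (corpus : List (List (List String))) (column : Int), Dom_add_chunking escaped corpus column → Pre_add_chunking escaped corpus column → Spec_add_chunking escaped corpus column (add_chunking escaped corpus column)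

-- ===== LEMMAS AND PROOFS =====

-- generic getD/set facts used by the loop characterisations
theorem pv_getD_set_self {α : Type} (l : List α) (i : Nat) (x d : α) (h : i < l.length) :
    (l.set i x).getD i d = x := by
  rw [List.getD_eq_getElem _ d (by simpa using h)]
  simp

theorem pv_getD_set_ne {α : Type} (l : List α) (i j : Nat) (x d : α) (h : i ≠ j) :
    (l.set i x).getD j d = l.getD j d := by
  simp [List.getD_eq_getElem?_getD, List.getElem?_set_ne h]

theorem pv_set_getD_self {α : Type} (l : List α) (i : Nat) (d : α) (h : i < l.length) :
    l.set i (l.getD i d) = l := by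
  rw [List.getD_eq_getElem _ d h]
  exact List.set_getElem_self _

-- a fold over range(len) whose step only rewrites index j at step j computes a mapIdx
theorem pv_fold_set {α : Type} (d : α) (step : List α → Nat → List α) (G : Nat → α → α) (l0 : List α)
    (hstep : ∀ r j, r.length = l0.length → j < l0.length → step r j = r.set j (G j (r.getD j d))) :
    (List.range l0.length).foldl step l0 = l0.mapIdx (fun i a => G i a) := by
  have aux : ∀ m, m ≤ l0.length →
      ((List.range m).foldl step l0).length = l0.length ∧
      ∀ j, j < l0.length → ((List.range m).foldl step l0).getD j d =
        if j < m then G j (l0.getD j d) else l0.getD j d := by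
    intro m
    induction m with
    | zero => intro _; simp
    | succ m ih =>
      intro hm
      obtain ⟨hlen, hval⟩ := ih (by omega)
      rw [List.range_succ, List.foldl_append, List.foldl_cons, List.foldl_nil]
      rw [hstep _ m hlen (by omega)]
      have hLm : ((List.range m).foldl step l0).getD m d = l0.getD m d := by
        rw [hval m (by omega)]; simp
      refine ⟨by simp [hlen], ?_⟩
      intro j hj
      by_cases hjm : j = m
      · subst hjm
        rw [pv_getD_set_self _ _ _ _ (by omega), hLm]
        simp
      · rw [pv_getD_set_ne _ _ _ _ _ (fun h => hjm h.symm), hval j hj]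
        by_cases h2 : j < m
        · have h3 : j < m + 1 := by omega
          simp [h2, h3]
        · have h3 : ¬ j < m + 1 := by omega
          simp [h2, h3]
  obtain ⟨hlen, hval⟩ := aux l0.length le_rfl
  apply List.ext_getElem (by simp [hlen])
  intro i h1 h2
  have h0 : i < l0.length := by simpa using h2
  have := hval i h0
  rw [List.getD_eq_getElem _ d h1, List.getD_eq_getElem _ d h0] at this
  simp only [List.getElem_mapIdx]
  rw [this]
  simp [h0]

-- close the previous/current token: append "</span>" iff its tag is B/I and the next tag (none = last) is not I
def pvClose (pt : String) (nt? : Option String) (pw : String) : String :=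
  if PySem.Chars.isIn [pvHead pt] "BI".toList &&
     (match nt? with | none => true | some tg => pvHead tg != 'I') then pw ++ "</span>" else pw

-- the common per-token normal form: open on 'B', then close by look-ahead
def pvTok (tag w : String) (nt? : Option String) : String :=
  pvClose tag nt? (if pvHead tag = 'B' then pvSpan (PySem.Str.slice tag (some 2) none) w else w)

-- per-row normal form, recursive on the row with the running index
def pvRow (t : Nat → String) (k : Nat) : List String → List String
  | [] => []
  | w :: rest => pvTok (t k) w (match rest with | [] => none | _ :: _ => some (t (k+1))) :: pvRow t (k+1) rest

theorem pvRow_length (t : Nat → String) (k : Nat) (r : List String) : (pvRow t k r).length = r.length := by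
  induction r generalizing k with
  | nil => rfl
  | cons w rest ih => simp [pvRow, ih]

theorem pvRow_getElem (t : Nat → String) (k : Nat) (r : List String) (j : Nat) (hj : j < r.length) :
    (pvRow t k r)[j]'(by rw [pvRow_length]; exact hj) =
      pvTok (t (k + j)) (r[j]'hj) (if j + 1 = r.length then none else some (t (k + j + 1))) := by
  induction r generalizing k j with
  | nil => simp at hj
  | cons w rest ih =>
    cases j with
    | zero =>
      cases rest with
      | nil => simp [pvRow]
      | cons b l => simp [pvRow]
    | succ j =>
      have hj' : j < rest.length := by simpa using hj
      have := ih (k+1) j hj'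
      simp only [pvRow, List.getElem_cons_succ]
      rw [this]
      have h1 : k + 1 + j = k + (j + 1) := by omega
      by_cases hc : j + 1 = rest.length
      · have hc' : j + 1 + 1 = (w :: rest).length := by simp [hc]
        simp [hc, h1]
      · have hc' : ¬ (j + 1 + 1 = (w :: rest).length) := by simp; omega
        simp [hc, h1]

-- ---- A-side characterisation ----

-- A's inner-loop body at row level (r is to_return[i]; esc is escaped[i], read for the open)
def pvStepRow (t : Nat → String) (esc : List String) (r : List String) (j : Nat) : List String :=
  if pvHead (t j) = 'O' then r
  else
    let r' := if pvHead (t j) = 'B' then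
        r.set j (pvSpan (PySem.Str.slice (t j) (some 2) none) (esc.getD j ""))
      else r
    if PySem.Chars.isIn [pvHead (t j)] "BI".toList &&
       (j + 1 == r'.length || pvHead (t (j+1)) != 'I') then
      r'.set j ((r'.getD j "") ++ "</span>")
    else r'

-- the value A leaves at position j, as a function of the incoming value
def pvGrow (t : Nat → String) (esc : List String) (j : Nat) (w : String) : String :=
  if pvHead (t j) = 'O' then w
  else
    let w1 := if pvHead (t j) = 'B' then
        pvSpan (PySem.Str.slice (t j) (some 2) none) (esc.getD j "")
      else w
    if PySem.Chars.isIn [pvHead (t j)] "BI".toList &&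
       (j + 1 == esc.length || pvHead (t (j+1)) != 'I') then w1 ++ "</span>" else w1

theorem pvStepRow_set (t : Nat → String) (esc : List String) (r : List String) (j : Nat)
    (hlen : r.length = esc.length) (hj : j < esc.length) :
    pvStepRow t esc r j = r.set j (pvGrow t esc j (r.getD j "")) := by
  have hjr : j < r.length := by omega
  unfold pvStepRow pvGrow
  by_cases hO : pvHead (t j) = 'O'
  · rw [if_pos hO, if_pos hO]
    exact (pv_set_getD_self _ _ _ hjr).symm
  · rw [if_neg hO, if_neg hO]
    by_cases hB : pvHead (t j) = 'B'
    · simp only [if_pos hB]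
      rw [List.length_set, hlen, pv_getD_set_self _ _ _ _ hjr]
      split_ifs with hc
      · rw [List.set_set]
      · rfl
    · simp only [if_neg hB]
      rw [hlen]
      split_ifs with hc
      · rfl
      · exact (pv_set_getD_self _ _ _ hjr).symm

theorem pvRowA_eq (t : Nat → String) (esc : List String) :
    (List.range esc.length).foldl (pvStepRow t esc) esc = esc.mapIdx (fun j w => pvGrow t esc j w) :=
  pv_fold_set "" _ _ esc (fun r j h1 h2 => pvStepRow_set t esc r j h1 h2)

theorem pvMapIdx_grow_eq_pvRow (t : Nat → String) (esc : List String) :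
    esc.mapIdx (fun j w => pvGrow t esc j w) = pvRow t 0 esc := by
  apply List.ext_getElem (by simp [pvRow_length])
  intro j h1 h2
  have hj : j < esc.length := by simpa using h1
  rw [List.getElem_mapIdx]
  rw [pvRow_getElem t 0 esc j hj]
  simp only [Nat.zero_add]
  unfold pvGrow pvTok pvClose
  have hgd : esc[j]?.getD "" = esc[j] := by simp [List.getElem?_eq_getElem hj]
  by_cases hO : pvHead (t j) = 'O'
  · have hBI : PySem.Chars.isIn ['O'] ['B', 'I'] = false := by decide
    have hB : ¬ ('O' : Char) = 'B' := by decide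
    simp [hO, hBI, hB]
  · by_cases hlast : j + 1 = esc.length
    · simp [hO, hlast, hgd]
    · simp [hO, hlast, hgd]

theorem pvInnerA_set (escaped : List (List String)) (corpus : List (List (List String))) (column : Int)
    (i : Nat) (tr : List (List String)) (j : Nat) (hi : i < tr.length) :
    pvInnerA escaped corpus column i tr j =
      tr.set i (pvStepRow (pvCell corpus column i) (escaped.getD i []) (tr.getD i []) j) := by
  unfold pvInnerA pvStepRow
  by_cases hO : pvHead (pvCell corpus column i j) = 'O'
  · rw [if_pos hO, if_pos hO]
    exact (pv_set_getD_self _ _ _ hi).symm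
  · rw [if_neg hO, if_neg hO]
    by_cases hB : pvHead (pvCell corpus column i j) = 'B'
    · simp only [if_pos hB]
      rw [pv_getD_set_self _ _ _ _ hi]
      split_ifs with hc
      · rw [List.set_set]
      · rfl
    · simp only [if_neg hB]
      split_ifs with hc
      · rfl
      · exact (pv_set_getD_self _ _ _ hi).symm

theorem pvInnerA_fold (escaped : List (List String)) (corpus : List (List (List String))) (column : Int)
    (i : Nat) (fs : List Nat) : ∀ (tr : List (List String)), i < tr.length →
    fs.foldl (pvInnerA escaped corpus column i) tr =
      tr.set i (fs.foldl (pvStepRow (pvCell corpus column i) (escaped.getD i [])) (tr.getD i [])) := by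
  induction fs with
  | nil =>
    intro tr hi
    simp only [List.foldl_nil]
    exact (pv_set_getD_self _ _ _ hi).symm
  | cons f rest ih =>
    intro tr hi
    simp only [List.foldl_cons]
    rw [pvInnerA_set _ _ _ _ _ _ hi]
    rw [ih _ (by simpa using hi)]
    rw [pv_getD_set_self _ _ _ _ hi, List.set_set]

theorem add_chunking_eq (escaped : List (List String)) (corpus : List (List (List String))) (column : Int) :
    add_chunking escaped corpus column =
      escaped.mapIdx (fun i row => pvRow (pvCell corpus column i) 0 row) := by
  unfold add_chunking
  have h0 : escaped.map (fun e => PySem.List.slice e none none) = escaped := by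
    simp [PySem.List.slice_none_none]
  rw [h0]
  rw [pv_fold_set ([] : List String)
      (fun tr i => (List.range ((tr.getD i []).length)).foldl (pvInnerA escaped corpus column i) tr)
      (fun i row => (List.range row.length).foldl (pvStepRow (pvCell corpus column i) (escaped.getD i [])) row)
      escaped
      (fun tr i hlen hi => pvInnerA_fold escaped corpus column i _ tr (by omega))]
  apply List.ext_getElem (by simp)
  intro i h1 h2
  have hi : i < escaped.length := by simpa using h1
  simp only [List.getElem_mapIdx]
  have hesc : escaped.getD i [] = escaped[i] := List.getD_eq_getElem _ _ hi
  rw [hesc, pvRowA_eq, pvMapIdx_grow_eq_pvRow]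

-- ---- B-side characterisation ----

theorem pvB_fold (corpus : List (List (List String))) (column : Int) (i : Nat) (r : List String) :
    ∀ (k : Nat) (acc : List String) (pw pt : String),
    pvFlushB ((r.zipIdx k).foldl (pvStepB corpus column i) (acc, some (pw, pt))) =
      acc ++ pvClose pt (match r with | [] => none | _ :: _ => some (pvCell corpus column i k)) pw
          :: pvRow (pvCell corpus column i) k r := by
  induction r with
  | nil => intro k acc pw pt; simp [pvFlushB, pvClose, pvRow]
  | cons w rest ih =>
    intro k acc pw pt
    rw [List.zipIdx_cons, List.foldl_cons]
    show pvFlushB ((rest.zipIdx (k+1)).foldl (pvStepB corpus column i)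
      (acc ++ [pvClose pt (some (pvCell corpus column i k)) pw],
       some ((if pvHead (pvCell corpus column i k) = 'B' then
           pvSpan (PySem.Str.slice (pvCell corpus column i k) (some 2) none) w else w),
         pvCell corpus column i k))) = _
    rw [ih (k+1) _ _ _]
    simp [pvRow, pvTok, List.append_assoc]

theorem pvB_row (corpus : List (List (List String))) (column : Int) (i : Nat) (row : List String) :
    pvFlushB (row.zipIdx.foldl (pvStepB corpus column i) ([], none)) =
      pvRow (pvCell corpus column i) 0 row := by
  cases row with
  | nil => rfl
  | cons w rest =>
    rw [List.zipIdx_cons, List.foldl_cons]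
    show pvFlushB ((rest.zipIdx 1).foldl (pvStepB corpus column i)
      ([], some ((if pvHead (pvCell corpus column i 0) = 'B' then
          pvSpan (PySem.Str.slice (pvCell corpus column i 0) (some 2) none) w else w),
        pvCell corpus column i 0))) = _
    rw [pvB_fold]
    simp [pvRow, pvTok]

theorem add_chunking_alt_eq (escaped : List (List String)) (corpus : List (List (List String))) (column : Int) :
    add_chunking_alt escaped corpus column =
      escaped.mapIdx (fun i row => pvRow (pvCell corpus column i) 0 row) := by
  unfold add_chunking_alt
  rw [PySem.List.foldl_append_singleton_eq_map]
  rw [List.mapIdx_eq_zipIdx_map]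
  simp only [List.nil_append]
  congr 1
  funext p
  exact pvB_row corpus column p.2 p.1

-- ===== VERDICT (by name: the statement is the Claim_ definition above) =====
theorem add_chunking_spec : Claim_equal_add_chunking := by
  intro escaped corpus column _ _
  unfold Spec_add_chunking
  rw [add_chunking_eq, add_chunking_alt_eq]
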